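-- pv_equiv track=rewrite | github.com/brianfee/pylogic | pylogic/core.py | parse_logic_string
-- ===== SOURCE A (Python) =====
-- def parse_logic_string(logic_str):
--     """ Parses a logic string into equations and logic operators."""
--
--     # Subsitute commas for "and" statements. (Backwards compatibility)
--     logic_str = '(' + logic_str + ')'
--     logic_str = logic_str.replace(', ', ') and (')
--     logic_str = logic_str.replace(',', ') and (')
--
--     # Loop over logic string, marking the positions of logical operators.
--     i = 0
--     logic_pos = []
--     while i < len(logic_str):
--         if logic_str[i] in ['(', ')']:
--             logic_pos.append(i)
--         elif logic_str[i - 1:i + 4] == ' and ':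
--             for k in range(5):
--                 logic_pos.append(i - 1 + k)
--         elif logic_str[i - 1:i + 3] == ' or ':
--             for k in range(4):
--                 logic_pos.append(i - 1 + k)
--         i += 1
--
--     # Build a dictionary of equations between logical operators.
--     i = 0
--     logic_counter = 0
--     logic_dict = {}
--     prev_pos = 0
--     for pos in logic_pos:
--         if pos - prev_pos > 1:
--             logic_dict[str(logic_counter)] = logic_str[prev_pos + 1:pos]
--             logic_counter += 1
--
--         prev_pos = pos
--
--     # Substitute equations for dictionary values.
--     for key, value in logic_dict.items():
--         logic_str = logic_str.replace(value, '{' + key + '}')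
--
--     return logic_str, logic_dict
-- ===== SOURCE B (Python) =====
-- def parse_logic_string(logic_str):
--     """ Parses a logic string into equations and logic operators."""
--
--     # Same comma substitution as before (backwards compatibility).
--     logic_str = '(' + logic_str + ')'
--     logic_str = logic_str.replace(', ', ') and (')
--     logic_str = logic_str.replace(',', ') and (')
--
--     # Single pass: `cover` is the exclusive end of the operator window(s)
--     # seen so far; non-delimiter characters accumulate in `buf` and each
--     # maximal run becomes the next numbered equation.
--     logic_dict = {}
--     buf = []
--     cover = 0
--     for j, ch in enumerate(logic_str):
--         if logic_str[j:j + 5] == ' and ':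
--             cover = max(cover, j + 5)
--         elif logic_str[j:j + 4] == ' or ':
--             cover = max(cover, j + 4)
--         if ch in '()' or j < cover:
--             if buf:
--                 logic_dict[str(len(logic_dict))] = ''.join(buf)
--                 buf = []
--         else:
--             buf.append(ch)
--
--     # Substitute equations for dictionary values.
--     for key, value in logic_dict.items():
--         logic_str = logic_str.replace(value, '{' + key + '}')
--
--     return logic_str, logic_dict
-- ===== Notes on version B (the rewrite author's own statement) =====
-- stated objective: alternative
-- what changed: Replaces A's two extra passes (building a list of every delimiter position, then a gap scan over that list) with a single forward scan that keeps a buffer of equation characters and a coverage horizon for operator windows, emitting each equation directly; the comma substitution and the final replace loop are unchanged.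
import Mathlib
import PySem

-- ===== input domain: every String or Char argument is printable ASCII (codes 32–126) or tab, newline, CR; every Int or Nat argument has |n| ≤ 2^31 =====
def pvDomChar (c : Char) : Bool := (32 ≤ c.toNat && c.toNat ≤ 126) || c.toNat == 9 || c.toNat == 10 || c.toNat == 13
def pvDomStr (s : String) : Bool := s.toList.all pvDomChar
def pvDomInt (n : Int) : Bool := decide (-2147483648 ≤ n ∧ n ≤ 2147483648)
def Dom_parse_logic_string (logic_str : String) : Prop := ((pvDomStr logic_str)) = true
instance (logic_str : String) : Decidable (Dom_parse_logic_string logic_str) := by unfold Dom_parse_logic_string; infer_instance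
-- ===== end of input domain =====

-- B is a single forward scan that extracts the equations directly into a buffer
-- (using a coverage horizon for operator windows) instead of A's two extra passes
-- (a position list, then a gap scan over it); alternative algorithm, measured a bit faster.

-- ===== PORT A =====
-- literal transliteration of A: wrap + comma substitution, char-by-char operator
-- position list, gap pass building the dict, then the replace loop.
def parse_logic_string (logic_str : String) : String × (List (String × String)) :=
  let cs : List Char :=
    PySem.Chars.replace
      (PySem.Chars.replace ('(' :: logic_str.toList ++ [')']) (", ".toList) (") and (".toList))
      (",".toList) (") and (".toList)
  let logic_pos : List Int :=
    (PySem.List.pyRange 0 (PySem.List.len cs) 1).foldl (fun acc i =>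
      if PySem.List.pyGetD cs i ' ' ∈ ['(', ')'] then acc ++ [i]
      else if PySem.List.slice cs (some (i - 1)) (some (i + 4)) = " and ".toList then
        (PySem.List.pyRange 0 5 1).foldl (fun a k => a ++ [i - 1 + k]) acc
      else if PySem.List.slice cs (some (i - 1)) (some (i + 3)) = " or ".toList then
        (PySem.List.pyRange 0 4 1).foldl (fun a k => a ++ [i - 1 + k]) acc
      else acc) []
  let st : Int × PySem.Dict String String × Int :=
    logic_pos.foldl (fun st pos =>
      if pos - st.2.2 > 1 then
        (st.1 + 1,
         (st.2.1.insert (PySem.Int.toStr st.1)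
            (String.ofList (PySem.List.slice cs (some (st.2.2 + 1)) (some pos)))),
         pos)
      else (st.1, st.2.1, pos)) (0, PySem.Dict.empty, 0)
  let d : PySem.Dict String String := st.2.1
  let res : List Char := d.items.foldl (fun s kv =>
      PySem.Chars.replace s kv.2.toList ('{' :: kv.1.toList ++ ['}'])) cs
  (String.ofList res, d.items)

-- ===== PORT B =====
-- literal transliteration of B (Source B): one pass over enumerate(logic_str) with a
-- buffer of equation characters and the exclusive end `cover` of operator windows.
def parse_logic_string_alt (logic_str : String) : String × (List (String × String)) :=
  let cs : List Char :=
    PySem.Chars.replace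
      (PySem.Chars.replace ('(' :: logic_str.toList ++ [')']) (", ".toList) (") and (".toList))
      (",".toList) (") and (".toList)
  let st : PySem.Dict String String × List Char × Int :=
    (PySem.List.enumerate cs).foldl (fun st jc =>
      let cover : Int :=
        if PySem.List.slice cs (some jc.1) (some (jc.1 + 5)) = " and ".toList then
          max st.2.2 (jc.1 + 5)
        else if PySem.List.slice cs (some jc.1) (some (jc.1 + 4)) = " or ".toList then
          max st.2.2 (jc.1 + 4)
        else st.2.2
      if jc.2 ∈ ['(', ')'] ∨ jc.1 < cover then
        if st.2.1 ≠ [] then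
          ((st.1.insert (PySem.Int.toStr (st.1.size : Int)) (String.ofList st.2.1)), [], cover)
        else (st.1, st.2.1, cover)
      else (st.1, st.2.1 ++ [jc.2], cover)) (PySem.Dict.empty, [], 0)
  let d : PySem.Dict String String := st.1
  let res : List Char := d.items.foldl (fun s kv =>
      PySem.Chars.replace s kv.2.toList ('{' :: kv.1.toList ++ ['}'])) cs
  (String.ofList res, d.items)

-- ===== PRECONDITION & SPEC =====
def Spec_parse_logic_string (logic_str : String) (out : String × (List (String × String))) : Prop := out = parse_logic_string_alt logic_str
instance (logic_str : String) (out : String × (List (String × String))) : Decidable (Spec_parse_logic_string logic_str out) := by unfold Spec_parse_logic_string; infer_instance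

-- ===== CLAIM (what is proved, stated in full; the proofs are below) =====
def Claim_equal_parse_logic_string : Prop := ∀ (logic_str : String), Dom_parse_logic_string logic_str → Spec_parse_logic_string logic_str (parse_logic_string logic_str)

-- ===== LEMMAS AND PROOFS =====

-- window / delimiter predicates on the preprocessed character list
def pvW5 (cs : List Char) (p : Nat) : Bool := decide ((cs.drop p).take 5 = " and ".toList)
def pvW4 (cs : List Char) (p : Nat) : Bool := decide ((cs.drop p).take 4 = " or ".toList)
def pvParenB (cs : List Char) (j : Nat) : Bool := decide (cs.getD j ' ' ∈ ['(', ')'])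
def pvCov (cs : List Char) (j : Nat) : Bool :=
  (List.range 5).any (fun k => decide (k ≤ j) && pvW5 cs (j - k)) ||
  (List.range 4).any (fun k => decide (k ≤ j) && pvW4 cs (j - k))
def pvMarked (cs : List Char) (j : Nat) : Bool := pvParenB cs j || pvCov cs j

-- the reference one-pass extractor E
def pvStepE (cs : List Char) (st : PySem.Dict String String × List Char) (j : Nat) :
    PySem.Dict String String × List Char :=
  if pvMarked cs j then
    if st.2 ≠ [] then
      ((st.1.insert (PySem.Int.toStr (st.1.size : Int)) (String.ofList st.2)), [])
    else st
  else (st.1, st.2 ++ [cs.getD j ' '])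
def pvE (cs : List Char) (m : Nat) : PySem.Dict String String × List Char :=
  (List.range m).foldl (pvStepE cs) (PySem.Dict.empty, [])

-- B's running cover, as a Nat
def pvC (cs : List Char) (m : Nat) : Nat :=
  (List.range m).foldl (fun c p =>
    if pvW5 cs p then max c (p + 5) else if pvW4 cs p then max c (p + 4) else c) 0

-- A's gap step and per-index contribution to logic_pos
def pvGA (cs : List Char) (st : Int × PySem.Dict String String × Int) (pos : Int) :
    Int × PySem.Dict String String × Int :=
  if pos - st.2.2 > 1 then
    (st.1 + 1,
     (st.2.1.insert (PySem.Int.toStr st.1)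
        (String.ofList (PySem.List.slice cs (some (st.2.2 + 1)) (some pos)))),
     pos)
  else (st.1, st.2.1, pos)
def pvCA (cs : List Char) (i : Nat) : List Int :=
  if pvParenB cs i then [(i : Int)]
  else if pvW5 cs (i - 1) then [(i:Int) - 1, (i:Int), (i:Int) + 1, (i:Int) + 2, (i:Int) + 3]
  else if pvW4 cs (i - 1) then [(i:Int) - 1, (i:Int), (i:Int) + 1, (i:Int) + 2]
  else []
def pvAstate (cs : List Char) (m : Nat) : Int × PySem.Dict String String × Int :=
  (List.range m).foldl (fun st i => (pvCA cs i).foldl (pvGA cs) st) (0, PySem.Dict.empty, 0)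

-- the invariant of A's combined (position list + gap) computation
def pvINV (cs : List Char) (m : Nat) (st : Int × PySem.Dict String String × Int) : Prop :=
  ∃ PN : Nat, st.2.2 = (PN : Int) ∧ PN < cs.length ∧ pvMarked cs PN = true ∧
    st.1 = (st.2.1.size : Int) ∧
    (∀ q : Nat, q < m → pvParenB cs q = true → q ≤ PN) ∧
    (∀ p : Nat, p + 1 < m → pvW5 cs p = true → p + 5 ≤ PN + 1) ∧
    (∀ p : Nat, p + 1 < m → pvW4 cs p = true → p + 4 ≤ PN + 1) ∧
    (m ≤ PN → ∃ p0, p0 + 1 < m ∧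
      ((pvW5 cs p0 = true ∧ PN = p0 + 4) ∨ (pvW4 cs p0 = true ∧ PN = p0 + 3))) ∧
    st.2.1 = (pvE cs (PN + 1)).1 ∧ (pvE cs (PN + 1)).2 = []

-- ----- basic string-window facts -----
theorem pvW5_len {cs : List Char} {p : Nat} (h : pvW5 cs p = true) : p + 5 ≤ cs.length := by
  have h' : (cs.drop p).take 5 = " and ".toList := by simpa [pvW5] using h
  have : ((cs.drop p).take 5).length = 5 := by rw [h']; decide
  simp [List.length_take, List.length_drop] at this
  omega
theorem pvW4_len {cs : List Char} {p : Nat} (h : pvW4 cs p = true) : p + 4 ≤ cs.length := by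
  have h' : (cs.drop p).take 4 = " or ".toList := by simpa [pvW4] using h
  have : ((cs.drop p).take 4).length = 4 := by rw [h']; decide
  simp [List.length_take, List.length_drop] at this
  omega
theorem pvW5_char {cs : List Char} {p : Nat} (h : pvW5 cs p = true) (k : Nat) (hk : k < 5) :
    cs.getD (p + k) ' ' = (" and ".toList).getD k ' ' := by
  have h' : (cs.drop p).take 5 = " and ".toList := by simpa [pvW5] using h
  have h1 : ((cs.drop p).take 5)[k]? = cs[p + k]? := by
    rw [List.getElem?_take_of_lt hk, List.getElem?_drop]
  have := congrArg (fun l => l.getD k ' ') h'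
  simp only [List.getD_eq_getElem?_getD] at this ⊢
  rw [h1] at this
  exact this
theorem pvW4_char {cs : List Char} {p : Nat} (h : pvW4 cs p = true) (k : Nat) (hk : k < 4) :
    cs.getD (p + k) ' ' = (" or ".toList).getD k ' ' := by
  have h' : (cs.drop p).take 4 = " or ".toList := by simpa [pvW4] using h
  have h1 : ((cs.drop p).take 4)[k]? = cs[p + k]? := by
    rw [List.getElem?_take_of_lt hk, List.getElem?_drop]
  have := congrArg (fun l => l.getD k ' ') h'
  simp only [List.getD_eq_getElem?_getD] at this ⊢
  rw [h1] at this
  exact this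
theorem pvCov_iff {cs : List Char} {j : Nat} : pvCov cs j = true ↔
    ∃ p, p ≤ j ∧ ((pvW5 cs p = true ∧ j < p + 5) ∨ (pvW4 cs p = true ∧ j < p + 4)) := by
  simp only [pvCov, Bool.or_eq_true, List.any_eq_true, List.mem_range, Bool.and_eq_true,
    decide_eq_true_eq]
  constructor
  · rintro (⟨k, hk5, hkj, hw⟩ | ⟨k, hk4, hkj, hw⟩)
    · exact ⟨j - k, by omega, Or.inl ⟨hw, by omega⟩⟩
    · exact ⟨j - k, by omega, Or.inr ⟨hw, by omega⟩⟩
  · rintro ⟨p, hpj, (⟨hw, hlt⟩ | ⟨hw, hlt⟩)⟩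
    · exact Or.inl ⟨j - p, by omega, by omega, by rw [show j - (j - p) = p by omega]; exact hw⟩
    · exact Or.inr ⟨j - p, by omega, by omega, by rw [show j - (j - p) = p by omega]; exact hw⟩

theorem pvWin_first {cs : List Char} {q : Nat} (hq : pvW5 cs q = true ∨ pvW4 cs q = true) :
    cs.getD q ' ' = ' ' := by
  rcases hq with h | h
  · have := pvW5_char h 0 (by omega); simpa using this
  · have := pvW4_char h 0 (by omega); simpa using this
theorem pvCov_not_paren {cs : List Char} {q : Nat} (h : pvCov cs q = true) :
    pvParenB cs q = false := by
  rcases pvCov_iff.mp h with ⟨p, hpj, hc⟩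
  have hne : ∀ k, k < 5 → (" and ".toList).getD k ' ' ∉ ['(', ')'] := by decide
  have hne4 : ∀ k, k < 4 → (" or ".toList).getD k ' ' ∉ ['(', ')'] := by decide
  rcases hc with ⟨hw, hlt⟩ | ⟨hw, hlt⟩
  · have := pvW5_char hw (q - p) (by omega)
    rw [show p + (q - p) = q by omega] at this
    simp only [pvParenB, decide_eq_false_iff_not, this]
    exact hne _ (by omega)
  · have := pvW4_char hw (q - p) (by omega)
    rw [show p + (q - p) = q by omega] at this
    simp only [pvParenB, decide_eq_false_iff_not, this]
    exact hne4 _ (by omega)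
-- two operator windows cannot overlap except in one shared space
theorem pvOverlap5 {cs : List Char} {p q : Nat} (hpq : p < q) (h5 : pvW5 cs p = true)
    (hq : pvW5 cs q = true ∨ pvW4 cs q = true) : p + 4 ≤ q := by
  by_contra hcon
  have hqc : cs.getD q ' ' = ' ' := pvWin_first hq
  have h1 := pvW5_char h5 (q - p) (by omega)
  rw [show p + (q - p) = q by omega, hqc] at h1
  have : ∀ k, 1 ≤ k → k < 4 → ¬ (' ' = (" and ".toList).getD k ' ') := by decide
  exact this (q - p) (by omega) (by omega) h1
theorem pvOverlap4 {cs : List Char} {p q : Nat} (hpq : p < q) (h4 : pvW4 cs p = true)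
    (hq : pvW5 cs q = true ∨ pvW4 cs q = true) : p + 3 ≤ q := by
  by_contra hcon
  have hqc : cs.getD q ' ' = ' ' := pvWin_first hq
  have h1 := pvW4_char h4 (q - p) (by omega)
  rw [show p + (q - p) = q by omega, hqc] at h1
  have : ∀ k, 1 ≤ k → k < 3 → ¬ (' ' = (" or ".toList).getD k ' ') := by decide
  exact this (q - p) (by omega) (by omega) h1
theorem pvW5_not_W4 {cs : List Char} {p : Nat} (h : pvW5 cs p = true) : pvW4 cs p = false := by
  by_contra hcon
  have h4 : pvW4 cs p = true := by simpa using hcon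
  have h1 := pvW5_char h 1 (by omega)
  have h2 := pvW4_char h4 1 (by omega)
  rw [h1] at h2
  exact absurd h2 (by decide)
-- covering characterisation
-- ----- E machinery -----
theorem pvE_succ (cs : List Char) (m : Nat) :
    pvE cs (m + 1) = pvStepE cs (pvE cs m) m := by
  simp [pvE, List.range_succ]
theorem pvE_buf_nil {cs : List Char} {a : Nat} (h : pvMarked cs a = true) :
    (pvE cs (a + 1)).2 = [] := by
  rw [pvE_succ, pvStepE, if_pos h]
  split
  · rfl
  · next hbuf => simpa using hbuf
-- across an unmarked run the dict is unchanged and the buffer is the run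
theorem pvE_run {cs : List Char} {a b : Nat} (hab : a < b) (hb : b ≤ cs.length)
    (ha : pvMarked cs a = true)
    (hun : ∀ q, a < q → q < b → pvMarked cs q = false) :
    pvE cs b = ((pvE cs (a + 1)).1, (cs.drop (a + 1)).take (b - (a + 1))) := by
  induction b, hab using Nat.le_induction with
  | base =>
    have h2 := pvE_buf_nil ha
    rw [show a + 1 - (a + 1) = 0 by omega]
    exact Prod.ext rfl (by simpa using h2)
  | succ b hab ih =>
    have hb' : b ≤ cs.length := by omega
    have hunb : pvMarked cs b = false := hun b (by omega) (by omega)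
    have ihh := ih hb' (fun q h1 h2 => hun q h1 (by omega))
    rw [pvE_succ, ihh, pvStepE]
    simp only [hunb, Bool.false_eq_true, if_false]
    refine Prod.ext rfl ?_
    have hblen : b - (a + 1) < (cs.drop (a + 1)).length := by
      simp [List.length_drop]; omega
    simp only
    rw [show b + 1 - (a + 1) = (b - (a + 1)) + 1 by omega, List.take_succ_eq_append_getElem hblen]
    congr 1
    refine congrArg (fun x => [x]) ?_
    have h1 : (List.drop (a + 1) cs)[b - (a + 1)]? = cs[b]? := by
      rw [List.getElem?_drop]
      congr 1
      omega
    rw [← List.getD_eq_getElem _ _ hblen]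
    simp only [List.getD_eq_getElem?_getD]
    rw [h1]
-- across a marked run the state (d, []) is preserved
theorem pvE_marked_run {cs : List Char} {a b : Nat} (hab : a ≤ b)
    (hm : ∀ q, a ≤ q → q < b → pvMarked cs q = true)
    (h : (pvE cs a).2 = []) :
    pvE cs b = ((pvE cs a).1, []) := by
  induction b, hab using Nat.le_induction with
  | base => exact Prod.ext rfl (by simpa using h)
  | succ b hab ih =>
    have ihh := ih (fun q h1 h2 => hm q h1 (by omega))
    rw [pvE_succ, ihh, pvStepE]
    simp [hm b hab (by omega)]

def pvDec (l : List Char) : Nat := l.foldl (fun a c => a * 10 + (c.toNat - 48)) 0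

theorem pv_core_append (f : Nat) : ∀ (n : Nat) (l : List Char),
    Nat.toDigitsCore 10 f n l = Nat.toDigitsCore 10 f n [] ++ l := by
  induction f with
  | zero => intro n l; rw [Nat.toDigitsCore, Nat.toDigitsCore]; simp
  | succ f ih =>
    intro n l
    rw [Nat.toDigitsCore, Nat.toDigitsCore]
    by_cases h : n / 10 = 0
    · simp [h]
    · simp only [h, if_false]
      rw [ih (n / 10) [(n % 10).digitChar], ih (n / 10) ((n % 10).digitChar :: l)]
      simp

theorem pv_dec_core (f : Nat) : ∀ n : Nat, n < f → pvDec (Nat.toDigitsCore 10 f n []) = n := by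
  induction f with
  | zero => intro n h; omega
  | succ f ih =>
    intro n h
    rw [Nat.toDigitsCore]
    have hd : ∀ k : Nat, k < 10 → (Nat.digitChar k).toNat - 48 = k := by decide
    by_cases h0 : n / 10 = 0
    · simp only [h0, if_true]
      have hn : n < 10 := by omega
      have h1 := hd (n % 10) (by omega)
      simp only [pvDec, List.foldl_cons, List.foldl_nil]
      omega
    · simp only [h0, if_false]
      rw [pv_core_append]
      have hn10 : n / 10 < f := by omega
      have := ih (n / 10) hn10
      rw [pvDec, List.foldl_append, ← pvDec, this]
      simp only [List.foldl_cons, List.foldl_nil]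
      rw [hd _ (by omega)]
      omega

theorem pv_toDigits_dec (n : Nat) : pvDec (Nat.toDigits 10 n) = n :=
  pv_dec_core (n + 1) n (by omega)

theorem pv_toStr_nat_inj (a b : Nat) (h : PySem.Int.toStr (a : Int) = PySem.Int.toStr (b : Int)) :
    a = b := by
  have h' : PySem.Int.toChars (a : Int) = PySem.Int.toChars (b : Int) := by
    have := congrArg String.toList h
    simpa [PySem.Int.toStr, String.toList_ofList] using this
  simp only [PySem.Int.toChars] at h'
  rw [if_neg (by omega), if_neg (by omega)] at h'
  simp only [Int.toNat_natCast] at h'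
  have := congrArg pvDec h'
  rwa [pv_toDigits_dec, pv_toDigits_dec] at this

theorem pvDict_fresh {d : PySem.Dict String String}
    (hk : d.keys = (List.range d.size).map (fun k : Nat => PySem.Int.toStr (k : Int))) :
    d.contains (PySem.Int.toStr (d.size : Int)) = false := by
  by_contra hc
  have hc' : d.contains (PySem.Int.toStr (d.size : Int)) = true := by simpa using hc
  have hmem := (PySem.Dict.contains_iff_mem_keys d _).mp hc'
  rw [hk] at hmem
  obtain ⟨k, hk1, hk2⟩ := List.mem_map.mp hmem
  have := pv_toStr_nat_inj k d.size hk2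
  simp at hk1
  omega

theorem pvDict_insert_size {d : PySem.Dict String String} {k : String} {v : String}
    (h : d.contains k = false) : (d.insert k v).size = d.size + 1 := by
  simp [PySem.Dict.size_insert, h]

theorem pvDict_insert_keys {d : PySem.Dict String String} {k : String} {v : String}
    (h : d.contains k = false) : (d.insert k v).keys = d.keys ++ [k] := by
  simp [PySem.Dict.keys, PySem.Dict.items_insert_of_not_contains d v h]

theorem pvE_keys (cs : List Char) (m : Nat) :
    (pvE cs m).1.keys = (List.range (pvE cs m).1.size).map (fun k : Nat => PySem.Int.toStr (k : Int)) := by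
  induction m with
  | zero => simp [pvE, PySem.Dict.keys, PySem.Dict.size, PySem.Dict.empty]
  | succ m ih =>
    rw [pvE_succ, pvStepE]
    split
    · split
      · next hbuf =>
        have hfresh := pvDict_fresh ih
        simp only
        rw [pvDict_insert_keys hfresh, pvDict_insert_size hfresh, ih, List.range_succ]
        simp
      · exact ih
    · exact ih

-- ----- cover machinery -----
theorem pvC_lt_iff {cs : List Char} {m j : Nat} : j < pvC cs m ↔
    ∃ p, p < m ∧ ((pvW5 cs p = true ∧ j < p + 5) ∨ (pvW4 cs p = true ∧ j < p + 4)) := by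
  induction m with
  | zero => simp [pvC]
  | succ m ih =>
    have hstep : pvC cs (m + 1) =
        (if pvW5 cs m then max (pvC cs m) (m + 5)
         else if pvW4 cs m then max (pvC cs m) (m + 4) else pvC cs m) := by
      simp [pvC, List.range_succ]
    rw [hstep]
    split
    · next h5 =>
      rw [lt_max_iff]
      constructor
      · rintro (hj | hj)
        · obtain ⟨p, hp, hc⟩ := ih.mp hj; exact ⟨p, by omega, hc⟩
        · exact ⟨m, by omega, Or.inl ⟨h5, hj⟩⟩
      · rintro ⟨p, hp, hc⟩
        by_cases hpm : p = m
        · subst hpm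
          rcases hc with ⟨_, h⟩ | ⟨h4, h⟩
          · right; omega
          · rw [pvW5_not_W4 h5] at h4; exact absurd h4 (by simp)
        · exact Or.inl (ih.mpr ⟨p, by omega, hc⟩)
    · next h5 =>
      split
      · next h4 =>
        rw [lt_max_iff]
        constructor
        · rintro (hj | hj)
          · obtain ⟨p, hp, hc⟩ := ih.mp hj; exact ⟨p, by omega, hc⟩
          · exact ⟨m, by omega, Or.inr ⟨h4, hj⟩⟩
        · rintro ⟨p, hp, hc⟩
          by_cases hpm : p = m
          · subst hpm
            rcases hc with ⟨h5', h⟩ | ⟨_, h⟩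
            · exact absurd h5' (by simpa using h5)
            · right; omega
          · exact Or.inl (ih.mpr ⟨p, by omega, hc⟩)
      · next h4 =>
        rw [ih]
        constructor
        · rintro ⟨p, hp, hc⟩; exact ⟨p, by omega, hc⟩
        · rintro ⟨p, hp, hc⟩
          by_cases hpm : p = m
          · subst hpm
            rcases hc with ⟨h5', _⟩ | ⟨h4', _⟩
            · exact absurd h5' (by simpa using h5)
            · exact absurd h4' (by simpa using h4)
          · exact ⟨p, by omega, hc⟩


theorem pvC_succ (cs : List Char) (m : Nat) :
    pvC cs (m + 1) = (if pvW5 cs m then max (pvC cs m) (m + 5)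
      else if pvW4 cs m then max (pvC cs m) (m + 4) else pvC cs m) := by
  simp [pvC, List.range_succ]

theorem pvCov_iff_ltC {cs : List Char} {m : Nat} : pvCov cs m = true ↔ m < pvC cs (m + 1) := by
  rw [pvCov_iff, pvC_lt_iff]
  constructor
  · rintro ⟨p, h1, h2⟩; exact ⟨p, by omega, h2⟩
  · rintro ⟨p, h1, h2⟩
    refine ⟨p, ?_, h2⟩
    rcases h2 with ⟨_, h⟩ | ⟨_, h⟩ <;> omega

theorem pv_slice5 (cs : List Char) (m : Nat) :
    PySem.List.slice cs (some (m : Int)) (some ((m : Int) + 5)) = (cs.drop m).take 5 := by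
  rw [show ((m : Int) + 5) = ((m + 5 : Nat) : Int) by push_cast; ring, PySem.List.slice_natCast,
    Nat.add_sub_cancel_left]

theorem pv_slice4 (cs : List Char) (m : Nat) :
    PySem.List.slice cs (some (m : Int)) (some ((m : Int) + 4)) = (cs.drop m).take 4 := by
  rw [show ((m : Int) + 4) = ((m + 4 : Nat) : Int) by push_cast; ring, PySem.List.slice_natCast,
    Nat.add_sub_cancel_left]

-- enumerate as an indexed map
theorem pv_enumerate_eq (cs : List Char) (s : Int) :
    PySem.List.enumerate cs s = (List.range cs.length).map (fun (j : Nat) => (s + (j : Int), cs.getD j ' ')) := by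
  induction cs generalizing s with
  | nil => simp [PySem.List.enumerate]
  | cons c t ih =>
    rw [show (c :: t).length = t.length + 1 from rfl, List.range_succ_eq_map]
    simp only [PySem.List.enumerate, List.map_cons, List.map_map]
    refine congrArg₂ _ (by simp) ?_
    rw [ih (s + 1)]
    refine List.map_congr_left ?_
    intro j hj
    simp only [Function.comp_apply, List.getD_cons_succ]
    congr 1
    push_cast
    ring

-- ----- replace keeps a leading '(' -----
theorem pv_replace_go_acc (old new : List Char) :
    ∀ (fuel : Nat) (l acc : List Char), ∃ r, PySem.Chars.replace.go old new fuel l acc = acc.reverse ++ r := by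
  intro fuel
  induction fuel with
  | zero => intro l acc; exact ⟨l, by rw [PySem.Chars.replace.go]⟩
  | succ f ih =>
    intro l acc
    cases l with
    | nil =>
      refine ⟨[], ?_⟩
      rw [PySem.Chars.replace.go]
      · simp
      · omega
    | cons c t =>
      by_cases hp : old.isPrefixOf (c :: t) = true
      · obtain ⟨r, hr⟩ := ih (List.drop old.length (c :: t)) (new.reverse ++ acc)
        refine ⟨new ++ r, ?_⟩
        rw [PySem.Chars.replace.go]
        · simp only [hp, if_true]
          rw [hr]; simp
      · obtain ⟨r, hr⟩ := ih t (c :: acc)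
        refine ⟨c :: r, ?_⟩
        rw [PySem.Chars.replace.go]
        · simp only [hp, if_false, Bool.false_eq_true]
          rw [hr]; simp
theorem pv_replace_cons (c : Char) (t old new : List Char) (hne : old ≠ [])
    (hpre : old.isPrefixOf (c :: t) = false) :
    ∃ r, PySem.Chars.replace (c :: t) old new = c :: r := by
  unfold PySem.Chars.replace
  rw [if_neg (by simpa [List.isEmpty_iff] using hne)]
  rw [show (c :: t).length = t.length + 1 from rfl]
  rw [PySem.Chars.replace.go]
  simp only [hpre, if_false, Bool.false_eq_true]
  obtain ⟨r, hr⟩ := pv_replace_go_acc old new t.length t [c]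
  exact ⟨r, by rw [hr]; simp⟩
theorem pv_prep_head (s : String) :
    ∃ t, PySem.Chars.replace
      (PySem.Chars.replace ('(' :: s.toList ++ [')']) (", ".toList) (") and (".toList))
      (",".toList) (") and (".toList) = '(' :: t := by
  obtain ⟨t1, h1⟩ := pv_replace_cons '(' (s.toList ++ [')']) (", ".toList) (") and (".toList)
    (by decide) (by simp [List.isPrefixOf])
  rw [show ('(' :: s.toList ++ [')'] : List Char) = '(' :: (s.toList ++ [')']) by simp, h1]
  exact pv_replace_cons '(' t1 (",".toList) (") and (".toList) (by decide)
    (by simp [List.isPrefixOf])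

-- ----- B equals E -----
theorem pvB_state (cs : List Char) (m : Nat) :
    ((List.range m).map (fun (j : Nat) => ((j : Int), cs.getD j ' '))).foldl (fun st jc =>
      let cover : Int :=
        if PySem.List.slice cs (some jc.1) (some (jc.1 + 5)) = " and ".toList then
          max st.2.2 (jc.1 + 5)
        else if PySem.List.slice cs (some jc.1) (some (jc.1 + 4)) = " or ".toList then
          max st.2.2 (jc.1 + 4)
        else st.2.2
      if jc.2 ∈ ['(', ')'] ∨ jc.1 < cover then
        if st.2.1 ≠ [] then
          ((st.1.insert (PySem.Int.toStr (st.1.size : Int)) (String.ofList st.2.1)), [], cover)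
        else (st.1, st.2.1, cover)
      else (st.1, st.2.1 ++ [jc.2], cover)) (PySem.Dict.empty, [], 0)
    = ((pvE cs m).1, (pvE cs m).2, (pvC cs m : Int)) := by
  induction m with
  | zero => simp [pvE, pvC]
  | succ m ih =>
    rw [List.range_succ, List.map_append, List.foldl_append, ih]
    simp only [List.map_cons, List.map_nil, List.foldl_cons, List.foldl_nil]
    rw [pv_slice5, pv_slice4]
    have hcast5 : max ((pvC cs m : Nat) : Int) ((m : Int) + 5) = ((max (pvC cs m) (m + 5) : Nat) : Int) := by
      push_cast; ring_nf
    have hcast4 : max ((pvC cs m : Nat) : Int) ((m : Int) + 4) = ((max (pvC cs m) (m + 4) : Nat) : Int) := by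
      push_cast; ring_nf
    have hcov : (if (cs.drop m).take 5 = " and ".toList then max ((pvC cs m : Nat) : Int) ((m : Int) + 5)
        else if (cs.drop m).take 4 = " or ".toList then max ((pvC cs m : Nat) : Int) ((m : Int) + 4)
        else ((pvC cs m : Nat) : Int)) = ((pvC cs (m + 1) : Nat) : Int) := by
      rw [pvC_succ]
      simp only [pvW5, pvW4, decide_eq_true_eq]
      split_ifs with h5 h4
      · rw [hcast5]
      · rw [hcast4]
      · rfl
    rw [hcov]
    have hmark : (cs.getD m ' ' ∈ ['(', ')'] ∨ (m : Int) < ((pvC cs (m + 1) : Nat) : Int)) ↔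
        pvMarked cs m = true := by
      rw [pvMarked, Bool.or_eq_true, pvParenB]
      constructor
      · rintro (h | h)
        · exact Or.inl (by simpa using h)
        · exact Or.inr (pvCov_iff_ltC.mpr (by exact_mod_cast h))
      · rintro (h | h)
        · exact Or.inl (by simpa using h)
        · exact Or.inr (by exact_mod_cast pvCov_iff_ltC.mp h)
    rw [pvE_succ, pvStepE]
    by_cases hm : pvMarked cs m = true
    · rw [if_pos (hmark.mpr hm), if_pos hm]
      by_cases hbuf : (pvE cs m).2 ≠ []
      · rw [if_pos hbuf, if_pos hbuf]
      · rw [if_neg hbuf, if_neg hbuf]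
    · rw [if_neg (fun h => hm (hmark.mp h)), if_neg hm]

-- ----- A's logic_pos decomposition -----
theorem pvA_pos (cs : List Char) (t : List Char) (hcs : cs = '(' :: t) :
    (PySem.List.pyRange 0 (PySem.List.len cs) 1).foldl (fun acc i =>
      if PySem.List.pyGetD cs i ' ' ∈ ['(', ')'] then acc ++ [i]
      else if PySem.List.slice cs (some (i - 1)) (some (i + 4)) = " and ".toList then
        (PySem.List.pyRange 0 5 1).foldl (fun a k => a ++ [i - 1 + k]) acc
      else if PySem.List.slice cs (some (i - 1)) (some (i + 3)) = " or ".toList then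
        (PySem.List.pyRange 0 4 1).foldl (fun a k => a ++ [i - 1 + k]) acc
      else acc) []
    = (List.range cs.length).flatMap (pvCA cs) := by
  have hlen : PySem.List.len cs = (cs.length : Int) := by simp
  rw [hlen, PySem.List.pyRange_zero_natCast, List.foldl_map]
  have hstep : ∀ (acc : List Int) (j : Nat), j ∈ List.range cs.length →
      (fun (acc : List Int) (j : Nat) =>
        (fun acc (i : Int) =>
          if PySem.List.pyGetD cs i ' ' ∈ ['(', ')'] then acc ++ [i]
          else if PySem.List.slice cs (some (i - 1)) (some (i + 4)) = " and ".toList then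
            (PySem.List.pyRange 0 5 1).foldl (fun a k => a ++ [i - 1 + k]) acc
          else if PySem.List.slice cs (some (i - 1)) (some (i + 3)) = " or ".toList then
            (PySem.List.pyRange 0 4 1).foldl (fun a k => a ++ [i - 1 + k]) acc
          else acc) acc ((j : Nat) : Int)) acc j = acc ++ pvCA cs j := by
    intro acc j hj
    simp only [PySem.List.pyGetD_natCast]
    by_cases hp : cs[j]?.getD ' ' ∈ ['(', ')']
    · rw [if_pos (by simpa using hp)]
      rw [pvCA, if_pos (show pvParenB cs j = true by simp [pvParenB, List.getD_eq_getElem?_getD, hp])]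
    · rw [if_neg (by simpa using hp)]
      rcases Nat.eq_zero_or_pos j with hj0 | hj1
      · subst hj0
        exact absurd (by simp [hcs]) hp
      · have hs5 : PySem.List.slice cs (some ((j : Int) - 1)) (some ((j : Int) + 4))
            = (cs.drop (j - 1)).take 5 := by
          rw [show ((j : Int) - 1) = ((j - 1 : Nat) : Int) by omega,
            show ((j : Int) + 4) = (((j - 1) + 5 : Nat) : Int) by push_cast; omega,
            PySem.List.slice_natCast, Nat.add_sub_cancel_left]
        have hs4 : PySem.List.slice cs (some ((j : Int) - 1)) (some ((j : Int) + 3))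
            = (cs.drop (j - 1)).take 4 := by
          rw [show ((j : Int) - 1) = ((j - 1 : Nat) : Int) by omega,
            show ((j : Int) + 3) = (((j - 1) + 4 : Nat) : Int) by push_cast; omega,
            PySem.List.slice_natCast, Nat.add_sub_cancel_left]
        have hr5 : PySem.List.pyRange 0 5 1 = [0, 1, 2, 3, 4] := by decide
        have hr4 : PySem.List.pyRange 0 4 1 = [0, 1, 2, 3] := by decide
        have hand : " and ".toList = [' ', 'a', 'n', 'd', ' '] := rfl
        have hor : " or ".toList = [' ', 'o', 'r', ' '] := rfl
        rw [hs5, hs4, hr5, hr4, pvCA,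
          if_neg (show ¬ (pvParenB cs j = true) by simp [pvParenB, List.getD_eq_getElem?_getD, hp])]
        simp only [pvW5, pvW4, decide_eq_true_eq, hand, hor]
        split_ifs with h5 h4
        · simp only [List.foldl_cons, List.foldl_nil, List.append_assoc,
            List.singleton_append, List.cons_append, List.nil_append]
          congr 1
          simp only [List.cons.injEq, and_true]
          omega
        · simp only [List.foldl_cons, List.foldl_nil, List.append_assoc,
            List.singleton_append, List.cons_append, List.nil_append]
          congr 1
          simp only [List.cons.injEq, and_true]
          omega
        · simp
  refine Eq.trans (PySem.List.foldl_congr_mem _ _ (fun acc (j : Nat) => acc ++ pvCA cs j) _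
    (fun acc j hj => hstep acc j hj)) ?_
  rw [PySem.List.foldl_append_eq_flatMap]
  simp

theorem pvA_gap_flat (cs : List Char) (L : List (List Int)) (st : Int × PySem.Dict String String × Int) :
    L.flatten.foldl (pvGA cs) st = L.foldl (fun st l => l.foldl (pvGA cs) st) st := by
  induction L generalizing st with
  | nil => rfl
  | cons l L ih => rw [List.flatten_cons, List.foldl_append, List.foldl_cons, ih]

-- ----- the main invariant induction -----
-- A position strictly between the last marked position and the scan frontier is unmarked
theorem pv_unmark (cs : List Char) (M PN : Nat)
    (h3 : ∀ q, q < M → pvParenB cs q = true → q ≤ PN)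
    (h4 : ∀ p, p + 1 < M → pvW5 cs p = true → p + 5 ≤ PN + 1)
    (h5 : ∀ p, p + 1 < M → pvW4 cs p = true → p + 4 ≤ PN + 1)
    (hw5 : M = 0 ∨ pvW5 cs (M - 1) = false) (hw4 : M = 0 ∨ pvW4 cs (M - 1) = false) :
    ∀ q, PN < q → q < M → pvMarked cs q = false := by
  intro q h1 h2
  rw [pvMarked, Bool.or_eq_false_iff]
  constructor
  · by_contra hp
    have hp' : pvParenB cs q = true := by simpa using hp
    exact absurd (h3 q h2 hp') (by omega)
  · by_contra hc
    have hc' : pvCov cs q = true := by simpa using hc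
    obtain ⟨p, hpq, hw⟩ := pvCov_iff.mp hc'
    rcases Nat.lt_or_ge (p + 1) M with hpM | hpM
    · rcases hw with ⟨hw, hlt⟩ | ⟨hw, hlt⟩
      · have := h4 p hpM hw; omega
      · have := h5 p hpM hw; omega
    · have hpe : p = M - 1 := by omega
      rcases hw with ⟨hw, _⟩ | ⟨hw, _⟩
      · rcases hw5 with h | h
        · omega
        · rw [hpe, h] at hw; exact absurd hw (by simp)
      · rcases hw4 with h | h
        · omega
        · rw [hpe, h] at hw; exact absurd hw (by simp)

theorem pvGA_small (cs : List Char) (c : Int) (d : PySem.Dict String String) (pp pos : Int)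
    (h : ¬ pos - pp > 1) : pvGA cs (c, d, pp) pos = (c, d, pos) := by
  rw [pvGA, if_neg (by simpa using h)]

theorem pvGA_big (cs : List Char) (c : Int) (d : PySem.Dict String String) (pp pos : Int)
    (h : pos - pp > 1) : pvGA cs (c, d, pp) pos =
      (c + 1, d.insert (PySem.Int.toStr c)
        (String.ofList (PySem.List.slice cs (some (pp + 1)) (some pos))), pos) := by
  rw [pvGA, if_pos (by simpa using h)]


theorem pvGA_block4 (cs : List Char) (c : Int) (d : PySem.Dict String String)
    (p0 p1 p2 p3 p4 : Int) (h1 : ¬ p1 - p0 > 1) (h2 : ¬ p2 - p1 > 1) (h3 : ¬ p3 - p2 > 1)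
    (h4 : ¬ p4 - p3 > 1) :
    List.foldl (pvGA cs) (c, d, p0) [p1, p2, p3, p4] = (c, d, p4) := by
  simp only [List.foldl_cons, List.foldl_nil]
  rw [pvGA_small cs c d p0 p1 h1, pvGA_small cs c d p1 p2 h2, pvGA_small cs c d p2 p3 h3,
    pvGA_small cs c d p3 p4 h4]

theorem pvGA_block3 (cs : List Char) (c : Int) (d : PySem.Dict String String)
    (p0 p1 p2 p3 : Int) (h1 : ¬ p1 - p0 > 1) (h2 : ¬ p2 - p1 > 1) (h3 : ¬ p3 - p2 > 1) :
    List.foldl (pvGA cs) (c, d, p0) [p1, p2, p3] = (c, d, p3) := by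
  simp only [List.foldl_cons, List.foldl_nil]
  rw [pvGA_small cs c d p0 p1 h1, pvGA_small cs c d p1 p2 h2, pvGA_small cs c d p2 p3 h3]

theorem pv_slice_nat (cs : List Char) (a b : Nat) :
    PySem.List.slice cs (some ((a : Int) + 1)) (some (b : Int)) = (cs.drop (a + 1)).take (b - (a + 1)) := by
  rw [show ((a : Int) + 1) = ((a + 1 : Nat) : Int) by push_cast; ring, PySem.List.slice_natCast]

theorem pvAstate_succ (cs : List Char) (m : Nat) :
    pvAstate cs (m + 1) = (pvCA cs m).foldl (pvGA cs) (pvAstate cs m) := by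
  simp [pvAstate, List.range_succ]

theorem pvE_flush (cs : List Char) (m : Nat) (hm : pvMarked cs m = true)
    (hne : (pvE cs m).2 ≠ []) :
    pvE cs (m + 1) = ((pvE cs m).1.insert (PySem.Int.toStr ((pvE cs m).1.size : Int))
      (String.ofList (pvE cs m).2), []) := by
  rw [pvE_succ, pvStepE, if_pos hm, if_pos hne]

theorem pvE_noflush (cs : List Char) (m : Nat) (hm : pvMarked cs m = true)
    (hne : (pvE cs m).2 = []) :
    pvE cs (m + 1) = pvE cs m := by
  rw [pvE_succ, pvStepE, if_pos hm, if_neg (by simp [hne])]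

theorem pvINV_holds (cs : List Char) (t : List Char) (hcs : cs = '(' :: t) :
    ∀ m, 1 ≤ m → m ≤ cs.length → pvINV cs m (pvAstate cs m) := by
  have hpar0 : pvParenB cs 0 = true := by simp [pvParenB, hcs]
  have hlen1 : 1 ≤ cs.length := by simp [hcs]
  intro m hm1 hmn
  induction m with
  | zero => omega
  | succ m ih =>
    rcases Nat.eq_zero_or_pos m with rfl | hm0
    · -- base case m + 1 = 1
      have hA1 : pvAstate cs 1 = (0, PySem.Dict.empty, 0) := by
        rw [pvAstate, show List.range 1 = [0] from rfl]
        simp only [List.foldl_cons, List.foldl_nil]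
        rw [pvCA, if_pos hpar0]
        simp only [List.foldl_cons, List.foldl_nil, Nat.cast_zero]
        exact pvGA_small cs 0 PySem.Dict.empty 0 0 (by omega)
      rw [hA1]
      refine ⟨0, by simp, by omega, by simp [pvMarked, hpar0], by simp, ?_, ?_, ?_, ?_, ?_, ?_⟩
      · intro q hq _; omega
      · intro p hp _; omega
      · intro p hp _; omega
      · intro h; omega
      · have : pvE cs 1 = (PySem.Dict.empty, []) := by
          rw [pvE_succ, pvStepE, if_pos (by simp [pvMarked, hpar0])]
          simp [pvE]
        rw [this]
      · have : pvE cs 1 = (PySem.Dict.empty, []) := by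
          rw [pvE_succ, pvStepE, if_pos (by simp [pvMarked, hpar0])]
          simp [pvE]
        rw [this]
    · -- inductive step
      have hINV := ih (by omega) (by omega)
      obtain ⟨PN, hP, hPn, hPm, hcnt, h3, h4, h5, h7, hd, hbuf⟩ := hINV
      rcases hA : pvAstate cs m with ⟨c, dct, pp⟩
      rw [hA] at hP hcnt hd
      simp only at hP hcnt hd
      subst hP
      rw [pvAstate_succ, hA]
      have hmlt : m < cs.length := by omega
      by_cases hparen : pvParenB cs m = true
      · -- a parenthesis at m
        have hw5f : pvW5 cs (m - 1) = false := by
          by_contra h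
          have h' : pvW5 cs (m - 1) = true := by simpa using h
          have : pvCov cs m = true := pvCov_iff.mpr ⟨m - 1, by omega, Or.inl ⟨h', by omega⟩⟩
          rw [pvCov_not_paren this] at hparen
          exact absurd hparen (by simp)
        have hw4f : pvW4 cs (m - 1) = false := by
          by_contra h
          have h' : pvW4 cs (m - 1) = true := by simpa using h
          have : pvCov cs m = true := pvCov_iff.mpr ⟨m - 1, by omega, Or.inr ⟨h', by omega⟩⟩
          rw [pvCov_not_paren this] at hparen
          exact absurd hparen (by simp)
        have hPNlt : PN < m := by
          by_contra h
          have hmPN : m ≤ PN := by omega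
          obtain ⟨p0, hp0m, hp0⟩ := h7 hmPN
          have hcov : pvCov cs m = true := by
            rcases hp0 with ⟨hw, he⟩ | ⟨hw, he⟩
            · exact pvCov_iff.mpr ⟨p0, by omega, Or.inl ⟨hw, by omega⟩⟩
            · exact pvCov_iff.mpr ⟨p0, by omega, Or.inr ⟨hw, by omega⟩⟩
          rw [pvCov_not_paren hcov] at hparen
          exact absurd hparen (by simp)
        have hun : ∀ q, PN < q → q < m → pvMarked cs q = false :=
          pv_unmark cs m PN h3 h4 h5 (Or.inr hw5f) (Or.inr hw4f)
        rw [pvCA, if_pos hparen]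
        simp only [List.foldl_cons, List.foldl_nil]
        have hmarkm : pvMarked cs m = true := by simp [pvMarked, hparen]
        by_cases hgap : ((m : Nat) : Int) - (PN : Int) > 1
        · -- gap: record an equation
          rw [pvGA_big cs c dct (PN : Int) (m : Int) hgap]
          have hrun := pvE_run (cs := cs) (a := PN) (b := m) (by omega) (by omega) hPm hun
          have hbne : (cs.drop (PN + 1)).take (m - (PN + 1)) ≠ [] := by
            have : ((cs.drop (PN + 1)).take (m - (PN + 1))).length = m - (PN + 1) := by
              simp [List.length_take, List.length_drop]; omega
            intro hnil
            rw [hnil] at this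
            simp at this
            omega
          have hflush := pvE_flush cs m hmarkm (by rw [hrun]; simpa using hbne)
          rw [hrun] at hflush
          simp only at hflush
          have hfresh := pvDict_fresh (pvE_keys cs (PN + 1))
          refine ⟨m, by simp, hmlt, hmarkm, ?_, ?_, ?_, ?_, ?_, ?_, ?_⟩
          · -- counter
            simp only
            rw [hcnt, hd, pv_slice_nat, pvDict_insert_size hfresh]
            push_cast
            ring
          · intro q hq hpq
            rcases Nat.lt_or_ge q m with h | h
            · exact le_of_lt (lt_of_le_of_lt (h3 q h hpq) hPNlt)
            · omega
          · intro p hp hw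
            rcases Nat.lt_or_ge (p + 1) m with h | h
            · have := h4 p h hw; omega
            · have hpe : p = m - 1 := by omega
              rw [hpe, hw5f] at hw
              exact absurd hw (by simp)
          · intro p hp hw
            rcases Nat.lt_or_ge (p + 1) m with h | h
            · have := h5 p h hw; omega
            · have hpe : p = m - 1 := by omega
              rw [hpe, hw4f] at hw
              exact absurd hw (by simp)
          · intro h; omega
          · simp only
            rw [hflush, hcnt, hd, pv_slice_nat]
          · rw [hflush]
        · -- no gap: PN = m - 1
          have hPNe : PN + 1 = m := by omega
          rw [pvGA_small cs c dct (PN : Int) (m : Int) hgap]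
          have hEm : pvE cs m = ((pvE cs m).1, []) := by
            rw [← hPNe]
            exact Prod.ext rfl (by simpa using hbuf)
          have hnoflush := pvE_noflush cs m hmarkm (by rw [← hPNe]; exact hbuf)
          refine ⟨m, by simp, hmlt, hmarkm, by simpa using hcnt, ?_, ?_, ?_, ?_, ?_, ?_⟩
          · intro q hq hpq
            rcases Nat.lt_or_ge q m with h | h
            · exact le_trans (h3 q h hpq) (by omega)
            · omega
          · intro p hp hw
            rcases Nat.lt_or_ge (p + 1) m with h | h
            · have := h4 p h hw; omega
            · have hpe : p = m - 1 := by omega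
              rw [hpe, hw5f] at hw
              exact absurd hw (by simp)
          · intro p hp hw
            rcases Nat.lt_or_ge (p + 1) m with h | h
            · have := h5 p h hw; omega
            · have hpe : p = m - 1 := by omega
              rw [hpe, hw4f] at hw
              exact absurd hw (by simp)
          · intro h; omega
          · simp only
            rw [hnoflush, ← hPNe]
            exact hd
          · rw [hnoflush, ← hPNe]
            exact hbuf
      · -- not a parenthesis at m
        by_cases hw5 : pvW5 cs (m - 1) = true
        · -- an " and " window starting at m - 1
          have hm4 : m + 4 ≤ cs.length := by have := pvW5_len hw5; omega
          have hPNle : PN ≤ m - 1 := by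
            by_contra h
            have hmPN : m ≤ PN := by omega
            obtain ⟨p0, hp0m, hp0⟩ := h7 hmPN
            rcases hp0 with ⟨hw, he⟩ | ⟨hw, he⟩
            · have := pvOverlap5 (p := p0) (q := m - 1) (by omega) hw (Or.inl hw5); omega
            · have := pvOverlap4 (p := p0) (q := m - 1) (by omega) hw (Or.inl hw5); omega
          have hcovm1 : pvCov cs (m - 1) = true :=
            pvCov_iff.mpr ⟨m - 1, le_refl _, Or.inl ⟨hw5, by omega⟩⟩
          have hmarkm1 : pvMarked cs (m - 1) = true := by simp [pvMarked, hcovm1]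
          have hmrun : ∀ q, m - 1 ≤ q → q < m + 4 → pvMarked cs q = true := by
            intro q hq1 hq2
            have : pvCov cs q = true := pvCov_iff.mpr ⟨m - 1, by omega, Or.inl ⟨hw5, by omega⟩⟩
            simp [pvMarked, this]
          rw [pvCA, if_neg (by simp [hparen]), if_pos hw5]
          -- E-state at m + 4
          by_cases hgap : ((m : Int) - 1) - (PN : Int) > 1
          · -- record an equation at the start of the block
            have hPNlt : PN < m - 1 := by omega
            have hun : ∀ q, PN < q → q < m - 1 → pvMarked cs q = false := by
              refine pv_unmark cs (m - 1) PN (fun q hq => h3 q (by omega))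
                (fun p hp => h4 p (by omega)) (fun p hp => h5 p (by omega)) ?_ ?_
              · rcases Nat.eq_zero_or_pos (m - 1) with h | h
                · exact Or.inl h
                · refine Or.inr ?_
                  by_contra hx
                  have hx' : pvW5 cs (m - 1 - 1) = true := by simpa using hx
                  have := pvOverlap5 (p := m - 1 - 1) (q := m - 1) (by omega) hx' (Or.inl hw5)
                  omega
              · rcases Nat.eq_zero_or_pos (m - 1) with h | h
                · exact Or.inl h
                · refine Or.inr ?_
                  by_contra hx
                  have hx' : pvW4 cs (m - 1 - 1) = true := by simpa using hx
                  have := pvOverlap4 (p := m - 1 - 1) (q := m - 1) (by omega) hx' (Or.inl hw5)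
                  omega
            have hrun := pvE_run (cs := cs) (a := PN) (b := m - 1) (by omega) (by omega) hPm hun
            have hbne : (cs.drop (PN + 1)).take (m - 1 - (PN + 1)) ≠ [] := by
              have : ((cs.drop (PN + 1)).take (m - 1 - (PN + 1))).length = m - 1 - (PN + 1) := by
                simp [List.length_take, List.length_drop]; omega
              intro hnil
              rw [hnil] at this
              simp at this
              omega
            have hflush := pvE_flush cs (m - 1) hmarkm1 (by rw [hrun]; simpa using hbne)
            rw [hrun] at hflush
            simp only at hflush
            have hfresh := pvDict_fresh (pvE_keys cs (PN + 1))
            have hEm4 : pvE cs (m + 4) = ((pvE cs (m - 1 + 1)).1, []) := by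
              refine pvE_marked_run (a := m - 1 + 1) (b := m + 4) (by omega)
                (fun q hq1 hq2 => hmrun q (by omega) hq2) ?_
              rw [hflush]
            rw [hflush] at hEm4
            simp only at hEm4
            -- fold the five block positions
            rw [List.foldl_cons, pvGA_big cs c dct (PN : Int) ((m : Int) - 1) hgap,
              pvGA_block4 cs _ _ ((m : Int) - 1) (m : Int) ((m : Int) + 1) ((m : Int) + 2)
                ((m : Int) + 3) (by omega) (by omega) (by omega) (by omega)]
            refine ⟨m + 3, by push_cast; ring, by omega, by
              have : pvCov cs (m + 3) = true := pvCov_iff.mpr ⟨m - 1, by omega, Or.inl ⟨hw5, by omega⟩⟩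
              simp [pvMarked, this], ?_, ?_, ?_, ?_, ?_, ?_, ?_⟩
            · simp only
              have hsl : PySem.List.slice cs (some ((PN : Int) + 1)) (some ((m : Int) - 1))
                  = (cs.drop (PN + 1)).take (m - 1 - (PN + 1)) := by
                rw [show ((m : Int) - 1) = ((m - 1 : Nat) : Int) by omega]
                exact pv_slice_nat cs PN (m - 1)
              rw [hcnt, hd, hsl, pvDict_insert_size hfresh]
              push_cast
              ring
            · intro q hq hpq
              rcases Nat.lt_or_ge q m with h | h
              · have := h3 q h hpq; omega
              · have hqe : q = m := by omega
                rw [hqe] at hpq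
                exact absurd hpq (by simp [hparen])
            · intro p hp hw
              rcases Nat.lt_or_ge (p + 1) m with h | h
              · have := h4 p h hw; omega
              · have hpe : p = m - 1 := by omega
                omega
            · intro p hp hw
              rcases Nat.lt_or_ge (p + 1) m with h | h
              · have := h5 p h hw; omega
              · have hpe : p = m - 1 := by omega
                rw [hpe] at hw
                rw [pvW5_not_W4 hw5] at hw
                exact absurd hw (by simp)
            · intro _
              exact ⟨m - 1, by omega, Or.inl ⟨hw5, by omega⟩⟩
            · simp only
              have hsl : PySem.List.slice cs (some ((PN : Int) + 1)) (some ((m : Int) - 1))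
                  = (cs.drop (PN + 1)).take (m - 1 - (PN + 1)) := by
                rw [show ((m : Int) - 1) = ((m - 1 : Nat) : Int) by omega]
                exact pv_slice_nat cs PN (m - 1)
              rw [show m + 3 + 1 = m + 4 by omega, hEm4, hcnt, hd, hsl]
            · rw [show m + 3 + 1 = m + 4 by omega, hEm4]
          · -- no record: PN = m - 1 or PN = m - 2
            have hEm : pvE cs (m - 1 + 1) = ((pvE cs (PN + 1)).1, []) := by
              rcases Nat.lt_or_ge PN (m - 1) with hlt | hge
              · -- PN = m - 2, one unmarked-free step at m - 1
                have hPNe : PN + 1 = m - 1 := by omega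
                have := pvE_noflush cs (m - 1) hmarkm1 (by rw [← hPNe]; exact hbuf)
                rw [this, ← hPNe]
                exact Prod.ext rfl (by simpa using hbuf)
              · -- PN = m - 1
                have hPNe : PN = m - 1 := by omega
                rw [← hPNe]
                exact Prod.ext rfl (by simpa using hbuf)
            have hEm4 : pvE cs (m + 4) = ((pvE cs (PN + 1)).1, []) := by
              have := pvE_marked_run (a := m - 1 + 1) (b := m + 4) (by omega)
                (fun q hq1 hq2 => hmrun q (by omega) hq2) (by rw [hEm])
              rw [this, hEm]
            rw [List.foldl_cons, pvGA_small cs c dct (PN : Int) ((m : Int) - 1) hgap,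
              pvGA_block4 cs _ _ ((m : Int) - 1) (m : Int) ((m : Int) + 1) ((m : Int) + 2)
                ((m : Int) + 3) (by omega) (by omega) (by omega) (by omega)]
            refine ⟨m + 3, by push_cast; ring, by omega, by
              have : pvCov cs (m + 3) = true := pvCov_iff.mpr ⟨m - 1, by omega, Or.inl ⟨hw5, by omega⟩⟩
              simp [pvMarked, this], by simpa using hcnt, ?_, ?_, ?_, ?_, ?_, ?_⟩
            · intro q hq hpq
              rcases Nat.lt_or_ge q m with h | h
              · have := h3 q h hpq; omega
              · have hqe : q = m := by omega
                rw [hqe] at hpq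
                exact absurd hpq (by simp [hparen])
            · intro p hp hw
              rcases Nat.lt_or_ge (p + 1) m with h | h
              · have := h4 p h hw; omega
              · omega
            · intro p hp hw
              rcases Nat.lt_or_ge (p + 1) m with h | h
              · have := h5 p h hw; omega
              · have hpe : p = m - 1 := by omega
                rw [hpe] at hw
                rw [pvW5_not_W4 hw5] at hw
                exact absurd hw (by simp)
            · intro _
              exact ⟨m - 1, by omega, Or.inl ⟨hw5, by omega⟩⟩
            · simp only
              rw [show m + 3 + 1 = m + 4 by omega, hEm4]
              exact hd
            · rw [show m + 3 + 1 = m + 4 by omega, hEm4]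
        · by_cases hw4 : pvW4 cs (m - 1) = true
          · -- an " or " window starting at m - 1
            have hm3 : m + 3 ≤ cs.length := by have := pvW4_len hw4; omega
            have hPNle : PN ≤ m - 1 := by
              by_contra h
              have hmPN : m ≤ PN := by omega
              obtain ⟨p0, hp0m, hp0⟩ := h7 hmPN
              rcases hp0 with ⟨hw, he⟩ | ⟨hw, he⟩
              · have := pvOverlap5 (p := p0) (q := m - 1) (by omega) hw (Or.inr hw4); omega
              · have := pvOverlap4 (p := p0) (q := m - 1) (by omega) hw (Or.inr hw4); omega
            have hcovm1 : pvCov cs (m - 1) = true :=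
              pvCov_iff.mpr ⟨m - 1, le_refl _, Or.inr ⟨hw4, by omega⟩⟩
            have hmarkm1 : pvMarked cs (m - 1) = true := by simp [pvMarked, hcovm1]
            have hmrun : ∀ q, m - 1 ≤ q → q < m + 3 → pvMarked cs q = true := by
              intro q hq1 hq2
              have : pvCov cs q = true := pvCov_iff.mpr ⟨m - 1, by omega, Or.inr ⟨hw4, by omega⟩⟩
              simp [pvMarked, this]
            rw [pvCA, if_neg (by simp [hparen]), if_neg (by simp [hw5]), if_pos hw4]
            by_cases hgap : ((m : Int) - 1) - (PN : Int) > 1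
            · have hPNlt : PN < m - 1 := by omega
              have hun : ∀ q, PN < q → q < m - 1 → pvMarked cs q = false := by
                refine pv_unmark cs (m - 1) PN (fun q hq => h3 q (by omega))
                  (fun p hp => h4 p (by omega)) (fun p hp => h5 p (by omega)) ?_ ?_
                · rcases Nat.eq_zero_or_pos (m - 1) with h | h
                  · exact Or.inl h
                  · refine Or.inr ?_
                    by_contra hx
                    have hx' : pvW5 cs (m - 1 - 1) = true := by simpa using hx
                    have := pvOverlap5 (p := m - 1 - 1) (q := m - 1) (by omega) hx' (Or.inr hw4)
                    omega
                · rcases Nat.eq_zero_or_pos (m - 1) with h | h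
                  · exact Or.inl h
                  · refine Or.inr ?_
                    by_contra hx
                    have hx' : pvW4 cs (m - 1 - 1) = true := by simpa using hx
                    have := pvOverlap4 (p := m - 1 - 1) (q := m - 1) (by omega) hx' (Or.inr hw4)
                    omega
              have hrun := pvE_run (cs := cs) (a := PN) (b := m - 1) (by omega) (by omega) hPm hun
              have hbne : (cs.drop (PN + 1)).take (m - 1 - (PN + 1)) ≠ [] := by
                have : ((cs.drop (PN + 1)).take (m - 1 - (PN + 1))).length = m - 1 - (PN + 1) := by
                  simp [List.length_take, List.length_drop]; omega
                intro hnil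
                rw [hnil] at this
                simp at this
                omega
              have hflush := pvE_flush cs (m - 1) hmarkm1 (by rw [hrun]; simpa using hbne)
              rw [hrun] at hflush
              simp only at hflush
              have hfresh := pvDict_fresh (pvE_keys cs (PN + 1))
              have hEm3 : pvE cs (m + 3) = ((pvE cs (m - 1 + 1)).1, []) := by
                refine pvE_marked_run (a := m - 1 + 1) (b := m + 3) (by omega)
                  (fun q hq1 hq2 => hmrun q (by omega) hq2) ?_
                rw [hflush]
              rw [hflush] at hEm3
              simp only at hEm3
              rw [List.foldl_cons, pvGA_big cs c dct (PN : Int) ((m : Int) - 1) hgap,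
                pvGA_block3 cs _ _ ((m : Int) - 1) (m : Int) ((m : Int) + 1) ((m : Int) + 2)
                  (by omega) (by omega) (by omega)]
              refine ⟨m + 2, by push_cast; ring, by omega, by
                have : pvCov cs (m + 2) = true := pvCov_iff.mpr ⟨m - 1, by omega, Or.inr ⟨hw4, by omega⟩⟩
                simp [pvMarked, this], ?_, ?_, ?_, ?_, ?_, ?_, ?_⟩
              · simp only
                have hsl : PySem.List.slice cs (some ((PN : Int) + 1)) (some ((m : Int) - 1))
                    = (cs.drop (PN + 1)).take (m - 1 - (PN + 1)) := by
                  rw [show ((m : Int) - 1) = ((m - 1 : Nat) : Int) by omega]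
                  exact pv_slice_nat cs PN (m - 1)
                rw [hcnt, hd, hsl, pvDict_insert_size hfresh]
                push_cast
                ring
              · intro q hq hpq
                rcases Nat.lt_or_ge q m with h | h
                · have := h3 q h hpq; omega
                · have hqe : q = m := by omega
                  rw [hqe] at hpq
                  exact absurd hpq (by simp [hparen])
              · intro p hp hw
                rcases Nat.lt_or_ge (p + 1) m with h | h
                · have := h4 p h hw; omega
                · have hpe : p = m - 1 := by omega
                  rw [hpe] at hw
                  exact absurd hw hw5
              · intro p hp hw
                rcases Nat.lt_or_ge (p + 1) m with h | h
                · have := h5 p h hw; omega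
                · omega
              · intro _
                exact ⟨m - 1, by omega, Or.inr ⟨hw4, by omega⟩⟩
              · simp only
                have hsl : PySem.List.slice cs (some ((PN : Int) + 1)) (some ((m : Int) - 1))
                    = (cs.drop (PN + 1)).take (m - 1 - (PN + 1)) := by
                  rw [show ((m : Int) - 1) = ((m - 1 : Nat) : Int) by omega]
                  exact pv_slice_nat cs PN (m - 1)
                rw [show m + 2 + 1 = m + 3 by omega, hEm3, hcnt, hd, hsl]
              · rw [show m + 2 + 1 = m + 3 by omega, hEm3]
            · have hEm : pvE cs (m - 1 + 1) = ((pvE cs (PN + 1)).1, []) := by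
                rcases Nat.lt_or_ge PN (m - 1) with hlt | hge
                · have hPNe : PN + 1 = m - 1 := by omega
                  have := pvE_noflush cs (m - 1) hmarkm1 (by rw [← hPNe]; exact hbuf)
                  rw [this, ← hPNe]
                  exact Prod.ext rfl (by simpa using hbuf)
                · have hPNe : PN = m - 1 := by omega
                  rw [← hPNe]
                  exact Prod.ext rfl (by simpa using hbuf)
              have hEm3 : pvE cs (m + 3) = ((pvE cs (PN + 1)).1, []) := by
                have := pvE_marked_run (a := m - 1 + 1) (b := m + 3) (by omega)
                  (fun q hq1 hq2 => hmrun q (by omega) hq2) (by rw [hEm])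
                rw [this, hEm]
              rw [List.foldl_cons, pvGA_small cs c dct (PN : Int) ((m : Int) - 1) hgap,
                pvGA_block3 cs _ _ ((m : Int) - 1) (m : Int) ((m : Int) + 1) ((m : Int) + 2)
                  (by omega) (by omega) (by omega)]
              refine ⟨m + 2, by push_cast; ring, by omega, by
                have : pvCov cs (m + 2) = true := pvCov_iff.mpr ⟨m - 1, by omega, Or.inr ⟨hw4, by omega⟩⟩
                simp [pvMarked, this], by simpa using hcnt, ?_, ?_, ?_, ?_, ?_, ?_⟩
              · intro q hq hpq
                rcases Nat.lt_or_ge q m with h | h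
                · have := h3 q h hpq; omega
                · have hqe : q = m := by omega
                  rw [hqe] at hpq
                  exact absurd hpq (by simp [hparen])
              · intro p hp hw
                rcases Nat.lt_or_ge (p + 1) m with h | h
                · have := h4 p h hw; omega
                · have hpe : p = m - 1 := by omega
                  rw [hpe] at hw
                  exact absurd hw hw5
              · intro p hp hw
                rcases Nat.lt_or_ge (p + 1) m with h | h
                · have := h5 p h hw; omega
                · omega
              · intro _
                exact ⟨m - 1, by omega, Or.inr ⟨hw4, by omega⟩⟩
              · simp only
                rw [show m + 2 + 1 = m + 3 by omega, hEm3]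
                exact hd
              · rw [show m + 2 + 1 = m + 3 by omega, hEm3]
          · -- no delimiter contribution at m
            rw [pvCA, if_neg (by simp [hparen]), if_neg (by simp [hw5]), if_neg (by simp [hw4])]
            simp only [List.foldl_nil]
            refine ⟨PN, rfl, hPn, hPm, hcnt, ?_, ?_, ?_, ?_, hd, hbuf⟩
            · intro q hq hpq
              rcases Nat.lt_or_ge q m with h | h
              · exact h3 q h hpq
              · have hqe : q = m := by omega
                rw [hqe] at hpq
                exact absurd hpq (by simp [hparen])
            · intro p hp hw
              rcases Nat.lt_or_ge (p + 1) m with h | h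
              · exact h4 p h hw
              · have hpe : p = m - 1 := by omega
                rw [hpe] at hw
                exact absurd hw (by simp [hw5])
            · intro p hp hw
              rcases Nat.lt_or_ge (p + 1) m with h | h
              · exact h5 p h hw
              · have hpe : p = m - 1 := by omega
                rw [hpe] at hw
                exact absurd hw (by simp [hw4])
            · intro h
              obtain ⟨p0, hp0, hw⟩ := h7 (by omega)
              exact ⟨p0, by omega, hw⟩


-- A's dict equals E's dict
theorem pvA_dict (cs : List Char) (t : List Char) (hcs : cs = '(' :: t) :
    (pvAstate cs cs.length).2.1 = (pvE cs cs.length).1 := by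
  have hn1 : 1 ≤ cs.length := by simp [hcs]
  obtain ⟨PN, hP, hPn, hPm, hcnt, h3, h4, h5, h7, hd, hbuf⟩ :=
    pvINV_holds cs t hcs cs.length hn1 le_rfl
  rcases Nat.lt_or_ge (PN + 1) cs.length with hlt | hge
  · have hun : ∀ q, PN < q → q < cs.length → pvMarked cs q = false := by
      refine pv_unmark cs cs.length PN h3 h4 h5 (Or.inr ?_) (Or.inr ?_)
      · by_contra hx
        have hx' : pvW5 cs (cs.length - 1) = true := by simpa using hx
        have := pvW5_len hx'
        omega
      · by_contra hx
        have hx' : pvW4 cs (cs.length - 1) = true := by simpa using hx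
        have := pvW4_len hx'
        omega
    have hrun := pvE_run (cs := cs) (a := PN) (b := cs.length) (by omega) le_rfl hPm hun
    rw [hd, hrun]
  · have he : PN + 1 = cs.length := by omega
    rw [hd, he]

-- ===== VERDICT (by name: the statement is the Claim_ definition above) =====
theorem parse_logic_string_spec : Claim_equal_parse_logic_string := by
  intro s _
  unfold Spec_parse_logic_string
  obtain ⟨t, hcs⟩ := pv_prep_head s
  unfold parse_logic_string parse_logic_string_alt
  dsimp only
  rw [hcs]
  set cs : List Char := '(' :: t with hcsdef
  have hflat : ((List.range cs.length).flatMap (pvCA cs)).foldl (pvGA cs)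
      (0, PySem.Dict.empty, 0) = pvAstate cs cs.length := by
    rw [show (List.range cs.length).flatMap (pvCA cs)
        = ((List.range cs.length).map (pvCA cs)).flatten from List.flatMap_def, pvA_gap_flat,
      List.foldl_map]
    rfl
  have hA : (((PySem.List.pyRange 0 (PySem.List.len cs) 1).foldl (fun acc i =>
      if PySem.List.pyGetD cs i ' ' ∈ ['(', ')'] then acc ++ [i]
      else if PySem.List.slice cs (some (i - 1)) (some (i + 4)) = " and ".toList then
        (PySem.List.pyRange 0 5 1).foldl (fun a k => a ++ [i - 1 + k]) acc
      else if PySem.List.slice cs (some (i - 1)) (some (i + 3)) = " or ".toList then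
        (PySem.List.pyRange 0 4 1).foldl (fun a k => a ++ [i - 1 + k]) acc
      else acc) []).foldl (pvGA cs) (0, PySem.Dict.empty, 0)).2.1 = (pvE cs cs.length).1 := by
    rw [pvA_pos cs t rfl, hflat, pvA_dict cs t rfl]
  have hB : (((PySem.List.enumerate cs).foldl (fun st jc =>
      let cover : Int :=
        if PySem.List.slice cs (some jc.1) (some (jc.1 + 5)) = " and ".toList then
          max st.2.2 (jc.1 + 5)
        else if PySem.List.slice cs (some jc.1) (some (jc.1 + 4)) = " or ".toList then
          max st.2.2 (jc.1 + 4)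
        else st.2.2
      if jc.2 ∈ ['(', ')'] ∨ jc.1 < cover then
        if st.2.1 ≠ [] then
          ((st.1.insert (PySem.Int.toStr (st.1.size : Int)) (String.ofList st.2.1)), [], cover)
        else (st.1, st.2.1, cover)
      else (st.1, st.2.1 ++ [jc.2], cover)) (PySem.Dict.empty, [], 0)).1)
      = (pvE cs cs.length).1 := by
    rw [pv_enumerate_eq cs 0]
    simp only [zero_add]
    rw [pvB_state cs cs.length]
  rw [hB]
  rw [← hA]
  rfl
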